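-- pv_equiv track=rewrite | github.com/FuXi1999/EEG2GAIT | utils/utils.py | get_used_idx
-- ===== SOURCE A (Python) =====
-- def get_used_idx(s_names, problematic_sess, sample_per_epoch, val_sess, test_sess):
--     bad_idx = []
--     all_sess = []
--     sep_list = val_sess + test_sess
--     for name in s_names:
--         if name + '_1' not in sep_list:
--             all_sess.append(name + '_1')
--         if name + '_2' not in sep_list:
--             all_sess.append(name + '_2')
--     for sess in problematic_sess:
--         if sess in sep_list:
--             continue
--         sess_idx = all_sess.index(sess)
--         start_idx = sess_idx * sample_per_epoch
--         bad_idx.extend(range(start_idx, start_idx + sample_per_epoch))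
--
--     # 将 bad_idx 转换为集合
--     bad_idx_set = set(bad_idx)
--
--     # 使用集合来过滤 use_idx
--     use_idx = [idx for idx in range(sample_per_epoch * len(all_sess)) if idx not in bad_idx_set]
--
--
--     return use_idx
-- ===== SOURCE B (Python) =====
-- def get_used_idx(s_names, problematic_sess, sample_per_epoch, val_sess, test_sess):
--     sep_list = val_sess + test_sess
--     all_sess = [s for name in s_names for s in (name + '_1', name + '_2')
--                 if s not in sep_list]
--     bad = {all_sess.index(sess) for sess in problematic_sess if sess not in sep_list}
--     return [j for i in range(len(all_sess)) if i not in bad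
--             for j in range(i * sample_per_epoch, (i + 1) * sample_per_epoch)]
-- ===== Notes on version B (the rewrite author's own statement) =====
-- stated objective: simpler
-- what changed: B builds all_sess as one filtered flat comprehension instead of A's append-per-branch loop, collects bad session POSITIONS as a set comprehension (keeping .index so a missing session still raises ValueError), and emits kept index blocks directly with a nested comprehension over positions, instead of A's materializing every bad flat index into a set and filtering the entire flat range one index at a time.
import Mathlib
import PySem

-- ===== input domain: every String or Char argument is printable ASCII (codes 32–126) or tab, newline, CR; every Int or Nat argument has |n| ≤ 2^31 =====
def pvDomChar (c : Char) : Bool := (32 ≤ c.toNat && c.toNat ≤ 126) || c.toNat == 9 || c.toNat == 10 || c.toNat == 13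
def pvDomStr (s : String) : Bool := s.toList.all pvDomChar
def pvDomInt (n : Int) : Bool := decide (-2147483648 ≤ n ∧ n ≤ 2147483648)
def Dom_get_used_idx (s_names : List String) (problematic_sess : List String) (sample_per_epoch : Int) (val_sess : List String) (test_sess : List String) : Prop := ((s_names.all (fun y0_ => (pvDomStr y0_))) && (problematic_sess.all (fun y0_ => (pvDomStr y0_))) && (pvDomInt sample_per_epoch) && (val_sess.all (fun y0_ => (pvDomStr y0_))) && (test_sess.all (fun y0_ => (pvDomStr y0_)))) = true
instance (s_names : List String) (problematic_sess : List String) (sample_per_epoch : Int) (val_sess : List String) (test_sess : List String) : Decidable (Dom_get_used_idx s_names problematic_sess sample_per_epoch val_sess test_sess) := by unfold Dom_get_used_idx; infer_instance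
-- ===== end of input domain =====

-- B builds all_sess as one filtered flat comprehension, collects bad session POSITIONS
-- (not flat indices) into a set, and emits kept index blocks directly, instead of A's
-- filtering the whole flat range against a set of bad flat indices (objective: simpler).

-- ===== PORT A =====
def get_used_idx (s_names : List String) (problematic_sess : List String) (sample_per_epoch : Int) (val_sess : List String) (test_sess : List String) : List Int :=
  let sep_list := val_sess ++ test_sess
  let all_sess := s_names.foldl (fun acc name =>
      let acc := if (name ++ "_1") ∈ sep_list then acc else acc ++ [name ++ "_1"]
      if (name ++ "_2") ∈ sep_list then acc else acc ++ [name ++ "_2"]) []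
  let bad_idx := problematic_sess.foldl (fun acc sess =>
      if sess ∈ sep_list then acc
      else match PySem.List.index? all_sess sess with
        | none => acc   -- Python raises ValueError here; Pre_ excludes these inputs
        | some k =>
          let start_idx := (k : Int) * sample_per_epoch
          acc ++ PySem.List.pyRange start_idx (start_idx + sample_per_epoch) 1) []
  let bad_idx_set := PySem.Set.ofList bad_idx
  (PySem.List.pyRange 0 (sample_per_epoch * all_sess.length) 1).filter
      (fun idx => !(PySem.Set.contains bad_idx_set idx))

-- ===== PORT B =====
def get_used_idx_alt (s_names : List String) (problematic_sess : List String) (sample_per_epoch : Int) (val_sess : List String) (test_sess : List String) : List Int :=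
  let sep_list := val_sess ++ test_sess
  let all_sess := (s_names.flatMap (fun name => [name ++ "_1", name ++ "_2"])).filter
      (fun s => !decide (s ∈ sep_list))
  let bad := PySem.Set.ofList
      ((problematic_sess.filter (fun sess => !decide (sess ∈ sep_list))).filterMap
        (fun sess => (PySem.List.index? all_sess sess).map (fun k => (k : Int))))
        -- index? none = Python ValueError; Pre_ excludes these inputs
  (PySem.List.pyRange 0 (all_sess.length : Int) 1).flatMap
      (fun i => if PySem.Set.contains bad i then []
                else PySem.List.pyRange (i * sample_per_epoch) ((i + 1) * sample_per_epoch) 1)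

-- ===== PRECONDITION & SPEC =====
-- Pre_ excludes exactly the inputs where a problematic session is neither in val+test nor
-- of the form name+'_1'/'_2' for a listed name: there Python A raises ValueError in .index.
def Pre_get_used_idx (s_names : List String) (problematic_sess : List String) (sample_per_epoch : Int) (val_sess : List String) (test_sess : List String) : Prop :=
  ∀ sess ∈ problematic_sess, sess ∈ (val_sess ++ test_sess) ∨
    ∃ name ∈ s_names, sess = name ++ "_1" ∨ sess = name ++ "_2"
instance (s_names : List String) (problematic_sess : List String) (sample_per_epoch : Int) (val_sess : List String) (test_sess : List String) : Decidable (Pre_get_used_idx s_names problematic_sess sample_per_epoch val_sess test_sess) := by unfold Pre_get_used_idx; infer_instance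

def pvWitness_get_used_idx : List String × List String × Int × List String × List String :=
  (["s1", "s2"], ["s1_2"], 2, ["s2_1"], [])

def Spec_get_used_idx (s_names : List String) (problematic_sess : List String) (sample_per_epoch : Int) (val_sess : List String) (test_sess : List String) (out : List Int) : Prop := out = get_used_idx_alt s_names problematic_sess sample_per_epoch val_sess test_sess
instance (s_names : List String) (problematic_sess : List String) (sample_per_epoch : Int) (val_sess : List String) (test_sess : List String) (out : List Int) : Decidable (Spec_get_used_idx s_names problematic_sess sample_per_epoch val_sess test_sess out) := by unfold Spec_get_used_idx; infer_instance

-- ===== CLAIM =====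
def Claim_equal_get_used_idx : Prop := ∀ (s_names : List String) (problematic_sess : List String) (sample_per_epoch : Int) (val_sess : List String) (test_sess : List String), Dom_get_used_idx s_names problematic_sess sample_per_epoch val_sess test_sess → Pre_get_used_idx s_names problematic_sess sample_per_epoch val_sess test_sess → Spec_get_used_idx s_names problematic_sess sample_per_epoch val_sess test_sess (get_used_idx s_names problematic_sess sample_per_epoch val_sess test_sess)

-- ===== LEMMAS AND PROOFS =====

def pvBlock (spe : Int) (i : Int) : List Int := PySem.List.pyRange (i*spe) (i*spe + spe) 1

lemma pvBlock_nil {spe : Int} (h : spe ≤ 0) (i : Int) : pvBlock spe i = [] :=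
  PySem.List.pyRange_one_eq_nil (by omega)

lemma pvMem_block {spe x i : Int} : x ∈ pvBlock spe i ↔ i*spe ≤ x ∧ x < i*spe + spe := by
  simp [pvBlock, PySem.List.mem_pyRange_one]

lemma pvDisj {spe a b x : Int} (hs : 0 < spe) (h1 : a*spe ≤ x) (h2 : x < a*spe+spe)
    (h3 : b*spe ≤ x) (h4 : x < b*spe+spe) : a = b := by
  rcases lt_trichotomy a b with h | h | h
  · exfalso
    have : (a+1)*spe ≤ b*spe := mul_le_mul_of_nonneg_right (by omega) hs.le
    nlinarith
  · exact h
  · exfalso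
    have : (b+1)*spe ≤ a*spe := mul_le_mul_of_nonneg_right (by omega) hs.le
    nlinarith

lemma pvFlatNil (P : Int → Bool) (g : Int → List Int) (h : ∀ i, g i = []) (l : List Int) :
    l.flatMap (fun i => if P i then [] else g i) = [] := by
  apply List.flatMap_eq_nil_iff.mpr
  intro i _
  split
  · rfl
  · exact h i

-- the heart: filtering the full flat range by bad blocks = emitting the kept blocks
lemma pvBlocks (spe : Int) (ks : List Nat) (n : Nat) :
    (PySem.List.pyRange 0 (spe * (n:Int)) 1).filter
        (fun x => !decide (∃ k ∈ ks, x ∈ pvBlock spe (k:Int)))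
      = (PySem.List.pyRange 0 (n:Int) 1).flatMap
        (fun i => if decide (∃ k ∈ ks, (k:Int) = i) then [] else pvBlock spe i) := by
  rcases le_or_gt spe 0 with hs | hs
  · rw [PySem.List.pyRange_one_eq_nil (a := 0) (b := spe * (n:Int)) (by nlinarith [Int.natCast_nonneg n])]
    rw [pvFlatNil _ _ (fun i => pvBlock_nil hs i)]
    rfl
  · induction n with
    | zero => simp [PySem.List.pyRange_one_eq_nil]
    | succ n ih =>
      have hcast : spe * ((n+1 : Nat) : Int) = spe * (n:Int) + spe := by push_cast; ring
      have h0n : (0:Int) ≤ spe * (n:Int) := by positivity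
      rw [hcast, PySem.List.pyRange_one_append 0 (spe * (n:Int)) (spe * (n:Int) + spe) h0n (by omega),
          List.filter_append, ih]
      have hr : PySem.List.pyRange 0 ((n+1 : Nat) : Int) 1
          = PySem.List.pyRange 0 (n:Int) 1 ++ [(n:Int)] := by
        have := PySem.List.pyRange_one_succ_right (a := 0) (b := (n:Int)) (by omega)
        rw [show ((n+1 : Nat) : Int) = (n:Int) + 1 by push_cast; ring]
        exact this
      rw [hr, List.flatMap_append]
      simp only [List.flatMap_cons, List.flatMap_nil, List.append_nil]
      by_cases hk : ∃ k ∈ ks, (k:Int) = (n:Int)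
      · rcases hk with ⟨k, hkm, hke⟩
        rw [if_pos (by simp [← Nat.cast_inj.mp hke, hkm])]
        rw [List.filter_eq_nil_iff.mpr ?_]
        intro x hx
        have hxb : x ∈ pvBlock spe (k:Int) := by
          rw [hke, pvMem_block, mul_comm]
          exact PySem.List.mem_pyRange_one.mp hx
        simp only [Bool.not_eq_true', decide_eq_false_iff_not, not_not]
        exact ⟨k, hkm, hxb⟩
      · rw [if_neg (by simp; intro hn; exact absurd (⟨n, hn, rfl⟩ : ∃ k ∈ ks, (k:Int) = (n:Int)) hk)]
        have hb : PySem.List.pyRange (spe * (n:Int)) (spe * (n:Int) + spe) 1 = pvBlock spe (n:Int) := by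
          simp [pvBlock, mul_comm]
        rw [hb, List.filter_eq_self.mpr ?_]
        intro x hx
        simp only [Bool.not_eq_true', decide_eq_false_iff_not]
        rintro ⟨k, hkm, hxb⟩
        rw [pvMem_block] at hx hxb
        exact hk ⟨k, hkm, pvDisj hs hxb.1 hxb.2 hx.1 hx.2⟩

-- the positions A's bad loop hits, in order
def pvBadPos (all sep : List String) : List String → List Nat
  | [] => []
  | sess :: rest =>
      (if sess ∈ sep then ([] : List Nat)
       else match PySem.List.index? all sess with
            | none => []
            | some k => [k]) ++ pvBadPos all sep rest

lemma pvContains (s : List Int) (x : Int) : PySem.Set.contains s x = decide (x ∈ s) := by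
  by_cases h : x ∈ s
  · simp [h]
  · simp [h]

-- A's all_sess loop builds exactly B's filtered flat comprehension
lemma pvAll (sep : List String) : ∀ (l : List String) (acc : List String),
    l.foldl (fun acc name =>
      let acc := if (name ++ "_1") ∈ sep then acc else acc ++ [name ++ "_1"]
      if (name ++ "_2") ∈ sep then acc else acc ++ [name ++ "_2"]) acc
    = acc ++ (l.flatMap (fun name => [name ++ "_1", name ++ "_2"])).filter
        (fun s => !decide (s ∈ sep)) := by
  intro l
  induction l with
  | nil => intro acc; simp
  | cons n rest ih =>
    intro acc
    simp only [List.foldl_cons, List.flatMap_cons, List.filter_append]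
    by_cases h1 : (n ++ "_1") ∈ sep <;> by_cases h2 : (n ++ "_2") ∈ sep <;>
      simp [h1, h2, ih, List.append_assoc]

-- A's bad loop = flat indices of all pvBadPos blocks
lemma pvBadA (all sep : List String) (spe : Int) : ∀ (prob : List String) (acc : List Int),
    prob.foldl (fun acc sess => if sess ∈ sep then acc
      else match PySem.List.index? all sess with
        | none => acc
        | some k => acc ++ PySem.List.pyRange ((k:Int)*spe) ((k:Int)*spe + spe) 1) acc
    = acc ++ (pvBadPos all sep prob).flatMap (fun k : Nat => pvBlock spe (k:Int)) := by
  intro prob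
  induction prob with
  | nil => intro acc; simp [pvBadPos]
  | cons sess rest ih =>
    intro acc
    simp only [List.foldl_cons]
    by_cases hs : sess ∈ sep
    · rw [if_pos hs, ih]
      simp only [pvBadPos, if_pos hs, List.nil_append]
    · rw [if_neg hs]
      cases hidx : PySem.List.index? all sess with
      | none =>
        rw [ih, PySem.List.index?_eq_idxOf?] at *
        simp [pvBadPos, hs, hidx]
      | some k =>
        rw [ih, PySem.List.index?_eq_idxOf?] at *
        simp [pvBadPos, hs, hidx, pvBlock, List.append_assoc]

-- B's bad list = the pvBadPos positions, cast to Int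
lemma pvBadB (all sep : List String) : ∀ (prob : List String),
    (prob.filter (fun sess => !decide (sess ∈ sep))).filterMap
        (fun sess => (PySem.List.index? all sess).map (fun k => (k : Int)))
    = (pvBadPos all sep prob).map (fun k : Nat => (k : Int)) := by
  intro prob
  induction prob with
  | nil => simp [pvBadPos]
  | cons sess rest ih =>
    simp at ih
    by_cases hs : sess ∈ sep
    · simp [pvBadPos, hs, ih]
    · cases hidx : List.idxOf? sess all with
      | none => simp [pvBadPos, hs, hidx, ih]
      | some k => simp [pvBadPos, hs, hidx, ih]

-- the two ports, after abstracting all_sess and sep_list, agree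
lemma pv_core (all sep prob : List String) (spe : Int) :
    (PySem.List.pyRange 0 (spe * all.length) 1).filter
      (fun idx => !(PySem.Set.contains (PySem.Set.ofList (prob.foldl (fun acc sess =>
        if sess ∈ sep then acc
        else match PySem.List.index? all sess with
          | none => acc
          | some k => acc ++ PySem.List.pyRange ((k:Int)*spe) ((k:Int)*spe + spe) 1) [])) idx))
    = (PySem.List.pyRange 0 (all.length : Int) 1).flatMap
      (fun i => if PySem.Set.contains (PySem.Set.ofList
            ((prob.filter (fun sess => !decide (sess ∈ sep))).filterMap
              (fun sess => (PySem.List.index? all sess).map (fun k => (k : Int))))) i then []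
        else PySem.List.pyRange (i * spe) ((i + 1) * spe) 1) := by
  rw [pvBadA all sep spe prob [], pvBadB all sep prob]
  simp only [List.nil_append]
  have hpredA : (fun idx => !(PySem.Set.contains
        (PySem.Set.ofList ((pvBadPos all sep prob).flatMap (fun k : Nat => pvBlock spe (k:Int)))) idx))
      = (fun x => !decide (∃ k ∈ pvBadPos all sep prob, x ∈ pvBlock spe (k:Int))) := by
    funext x
    rw [pvContains]
    exact congrArg (fun b => !b) (decide_eq_decide.mpr
      (by rw [PySem.Set.mem_ofList, List.mem_flatMap]))
  have hpredB : (fun i => if PySem.Set.contains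
        (PySem.Set.ofList ((pvBadPos all sep prob).map (fun k : Nat => (k : Int)))) i then []
        else PySem.List.pyRange (i * spe) ((i + 1) * spe) 1)
      = (fun i => if decide (∃ k ∈ pvBadPos all sep prob, (k:Int) = i) then [] else pvBlock spe i) := by
    funext i
    rw [pvContains, decide_eq_decide.mpr
        (by rw [PySem.Set.mem_ofList, List.mem_map]),
      show (i+1)*spe = i*spe + spe from by ring]
    rfl
  rw [hpredA, hpredB]
  exact pvBlocks spe (pvBadPos all sep prob) all.length

theorem pv_main (s_names problematic_sess : List String) (spe : Int) (vs ts : List String) :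
    get_used_idx s_names problematic_sess spe vs ts = get_used_idx_alt s_names problematic_sess spe vs ts := by
  simp only [get_used_idx, get_used_idx_alt]
  generalize (vs ++ ts) = sep
  rw [pvAll sep s_names []]
  simp only [List.nil_append]
  exact pv_core _ sep problematic_sess spe

theorem get_used_idx_witness_ok :
    Dom_get_used_idx pvWitness_get_used_idx.1 pvWitness_get_used_idx.2.1 pvWitness_get_used_idx.2.2.1 pvWitness_get_used_idx.2.2.2.1 pvWitness_get_used_idx.2.2.2.2 ∧
    Pre_get_used_idx pvWitness_get_used_idx.1 pvWitness_get_used_idx.2.1 pvWitness_get_used_idx.2.2.1 pvWitness_get_used_idx.2.2.2.1 pvWitness_get_used_idx.2.2.2.2 := by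
  decide

-- ===== VERDICT =====
theorem get_used_idx_spec : Claim_equal_get_used_idx := by
  intro s_names problematic_sess spe vs ts _ _
  unfold Spec_get_used_idx
  exact pv_main s_names problematic_sess spe vs ts
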